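-- pv_equiv track=rewrite | github.com/juanjo810/digifolk | backend/app/api/deprecated/routes/admin/levels.py | interval_level
-- ===== SOURCE A (Python) =====
-- def interval_level(interval_hist):
--     level_1_ints = ['A1', 'm2', 'M2', 'm3', 'M3', 'P4']
--     if all(k in level_1_ints for k in interval_hist.keys()):
--         return 1
--     level_2_ints = ['A2', 'P5', 'm6', 'M6', 'm7', 'M7', 'P8']
--     if all(k in level_2_ints + level_1_ints for k in interval_hist.keys()):
--         return 2
--     return 3
-- ===== SOURCE B (Python) =====
-- def interval_level(interval_hist):
--     level_map = {'A1': 1, 'm2': 1, 'M2': 1, 'm3': 1, 'M3': 1, 'P4': 1,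
--                  'A2': 2, 'P5': 2, 'm6': 2, 'M6': 2, 'm7': 2, 'M7': 2, 'P8': 2}
--     return max((level_map.get(k, 3) for k in interval_hist.keys()), default=1)
-- ===== Notes on version B (the rewrite author's own statement) =====
-- stated objective: simpler
-- what changed: The two sequential all()-membership scans over name lists are replaced by one max-reduction over a name-to-level dict lookup (max of per-interval levels, default 1 for an empty histogram).
import Mathlib
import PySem

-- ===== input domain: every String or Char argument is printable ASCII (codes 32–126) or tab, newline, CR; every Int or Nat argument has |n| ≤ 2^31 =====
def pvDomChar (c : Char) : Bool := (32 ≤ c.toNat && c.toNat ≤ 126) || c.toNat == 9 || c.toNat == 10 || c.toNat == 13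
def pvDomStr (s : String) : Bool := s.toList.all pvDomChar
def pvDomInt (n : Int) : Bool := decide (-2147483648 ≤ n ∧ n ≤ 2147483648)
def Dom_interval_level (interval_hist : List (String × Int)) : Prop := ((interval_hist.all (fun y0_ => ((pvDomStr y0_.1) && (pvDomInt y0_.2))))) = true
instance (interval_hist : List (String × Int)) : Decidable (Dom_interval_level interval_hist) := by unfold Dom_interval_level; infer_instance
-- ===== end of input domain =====

-- B replaces A's two sequential all()-membership scans with a single max-reduction
-- over a name→level dict lookup (default 1 on an empty histogram): simpler, one pass.


-- ===== PORT A =====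
-- interval_hist is a Python dict: its keys() are the distinct first components in
-- first-insertion order (= PySem.List.dedup of the fst's — exact dict-key semantics).
def interval_level (interval_hist : List (String × Int)) : Int :=
  let level_1_ints : List String := ["A1", "m2", "M2", "m3", "M3", "P4"]
  let ks := PySem.List.dedup (interval_hist.map Prod.fst)
  if ks.all (fun k => level_1_ints.contains k) then 1
  else
    let level_2_ints : List String := ["A2", "P5", "m6", "M6", "m7", "M7", "P8"]
    if ks.all (fun k => (level_2_ints ++ level_1_ints).contains k) then 2
    else 3

-- ===== PORT B =====
-- Source B's level_map dict literal
def levelMap : PySem.Dict String Int :=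
  PySem.Dict.mk [("A1", 1), ("m2", 1), ("M2", 1), ("m3", 1), ("M3", 1), ("P4", 1),
                 ("A2", 2), ("P5", 2), ("m6", 2), ("M6", 2), ("m7", 2), ("M7", 2), ("P8", 2)]

def interval_level_alt (interval_hist : List (String × Int)) : Int :=
  let ks := PySem.List.dedup (interval_hist.map Prod.fst)
  PySem.List.maxD (ks.map (fun k => levelMap.getD k 3)) (fun x => x) 1

-- ===== PRECONDITION & SPEC =====
def Spec_interval_level (interval_hist : List (String × Int)) (out : Int) : Prop := out = interval_level_alt interval_hist
instance (interval_hist : List (String × Int)) (out : Int) : Decidable (Spec_interval_level interval_hist out) := by unfold Spec_interval_level; infer_instance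

-- ===== CLAIM (what is proved, stated in full; the proofs are below) =====
def Claim_equal_interval_level : Prop := ∀ (interval_hist : List (String × Int)), Dom_interval_level interval_hist → Spec_interval_level interval_hist (interval_level interval_hist)

-- ===== LEMMAS AND PROOFS =====

-- the per-key lookup of B, characterised by the two literal name lists of A
lemma levelMap_getD (k : String) :
    levelMap.getD k 3 =
      if k = "A1" ∨ k = "m2" ∨ k = "M2" ∨ k = "m3" ∨ k = "M3" ∨ k = "P4" then 1
      else if k = "A2" ∨ k = "P5" ∨ k = "m6" ∨ k = "M6" ∨ k = "m7" ∨ k = "M7" ∨ k = "P8" then 2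
      else 3 := by
  by_cases h0 : ("A1" : String) = k
  · subst h0; decide
  by_cases h1 : ("m2" : String) = k
  · subst h1; decide
  by_cases h2 : ("M2" : String) = k
  · subst h2; decide
  by_cases h3 : ("m3" : String) = k
  · subst h3; decide
  by_cases h4 : ("M3" : String) = k
  · subst h4; decide
  by_cases h5 : ("P4" : String) = k
  · subst h5; decide
  by_cases h6 : ("A2" : String) = k
  · subst h6; decide
  by_cases h7 : ("P5" : String) = k
  · subst h7; decide
  by_cases h8 : ("m6" : String) = k
  · subst h8; decide
  by_cases h9 : ("M6" : String) = k
  · subst h9; decide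
  by_cases h10 : ("m7" : String) = k
  · subst h10; decide
  by_cases h11 : ("M7" : String) = k
  · subst h11; decide
  by_cases h12 : ("P8" : String) = k
  · subst h12; decide
  simp only [levelMap, PySem.Dict.getD_eq_get?_getD, PySem.Dict.get?]
  simp [h0, h1, h2, h3, h4, h5, h6, h7, h8, h9, h10, h11, h12, fun i => (Ne.symm : ¬i = k → ¬k = i)]

lemma foldl_max_le (l : List Int) (a c : Int) (h : a ≤ c) (h2 : ∀ x ∈ l, x ≤ c) :
    l.foldl max a ≤ c := by
  induction l generalizing a with
  | nil => exact h
  | cons x t ih =>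
    exact ih (max a x) (max_le h (h2 x (by simp))) (fun y hy => h2 y (by simp [hy]))

-- B's one-pass max over an arbitrary key list equals A's two-scan classification
lemma core_eq (ks : List String) :
    PySem.List.maxD (ks.map (fun k => levelMap.getD k 3)) (fun x => x) 1 =
      (if ks.all (fun k => (["A1", "m2", "M2", "m3", "M3", "P4"] : List String).contains k) then 1
       else if ks.all (fun k => ((["A2", "P5", "m6", "M6", "m7", "M7", "P8"] : List String) ++ ["A1", "m2", "M2", "m3", "M3", "P4"]).contains k) then 2
       else 3) := by
  have hval : ∀ k : String, levelMap.getD k 3 = 1 ∨ levelMap.getD k 3 = 2 ∨ levelMap.getD k 3 = 3 := by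
    intro k; rw [levelMap_getD]; split_ifs <;> simp
  have hc1 : ∀ k : String, ((["A1", "m2", "M2", "m3", "M3", "P4"] : List String).contains k = true) ↔ levelMap.getD k 3 ≤ 1 := by
    intro k
    rw [levelMap_getD]
    simp only [List.contains_cons, List.contains_nil]
    split_ifs with h h2 <;> simp_all
  have hc2 : ∀ k : String, (((["A2", "P5", "m6", "M6", "m7", "M7", "P8"] : List String) ++ ["A1", "m2", "M2", "m3", "M3", "P4"]).contains k = true) ↔ levelMap.getD k 3 ≤ 2 := by
    intro k
    rw [levelMap_getD]
    simp only [List.contains_append, List.contains_cons, List.contains_nil, beq_iff_eq, Bool.or_eq_true]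
    split_ifs with h h2 <;> simp_all
  cases ks with
  | nil => simp [PySem.List.maxD, PySem.List.max?]
  | cons k0 t =>
    simp only [List.map_cons, PySem.List.maxD, PySem.List.max?_id_cons, Option.getD_some]
    have h1 : ∀ k : String, 1 ≤ levelMap.getD k 3 := by
      intro k; rcases hval k with h | h | h <;> omega
    have hle : ∀ c : Int, (∀ k ∈ k0 :: t, levelMap.getD k 3 ≤ c) →
        List.foldl max (levelMap.getD k0 3) (t.map (fun k => levelMap.getD k 3)) ≤ c := by
      intro c hc
      refine foldl_max_le _ _ _ (hc k0 (by simp)) ?_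
      intro x hx; rcases List.mem_map.1 hx with ⟨k, hk, rfl⟩; exact hc k (by simp [hk])
    have hge : ∀ k ∈ k0 :: t, levelMap.getD k 3 ≤
        List.foldl max (levelMap.getD k0 3) (t.map (fun k => levelMap.getD k 3)) := by
      intro k hk
      rcases List.mem_cons.1 hk with rfl | hk
      · exact (PySem.List.le_foldl_max (t.map (fun k => levelMap.getD k 3)) (levelMap.getD k 3)).1
      · exact (PySem.List.le_foldl_max (t.map (fun k => levelMap.getD k 3)) (levelMap.getD k0 3)).2
          (levelMap.getD k 3) (List.mem_map_of_mem hk)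
    split_ifs with hA hB
    · have h1' : ∀ k ∈ k0 :: t, levelMap.getD k 3 ≤ 1 := fun k hk => (hc1 k).1 (List.all_eq_true.1 hA k hk)
      have := hle 1 h1'
      have := hge k0 (by simp)
      have := h1 k0
      omega
    · have h2' : ∀ k ∈ k0 :: t, levelMap.getD k 3 ≤ 2 := fun k hk => (hc2 k).1 (List.all_eq_true.1 hB k hk)
      obtain ⟨k, hk, hkc⟩ : ∃ k ∈ k0 :: t, ¬ ((["A1", "m2", "M2", "m3", "M3", "P4"] : List String).contains k = true) := by
        by_contra hcon
        push Not at hcon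
        exact hA (List.all_eq_true.2 hcon)
      have hk2 : levelMap.getD k 3 = 2 := by
        have hx := (hc1 k).not.1 hkc
        have := h2' k hk
        rcases hval k with h | h | h <;> omega
      have := hle 2 h2'
      have := hge k hk
      omega
    · obtain ⟨k, hk, hkc⟩ : ∃ k ∈ k0 :: t, ¬ (((["A2", "P5", "m6", "M6", "m7", "M7", "P8"] : List String) ++ ["A1", "m2", "M2", "m3", "M3", "P4"]).contains k = true) := by
        by_contra hcon
        push Not at hcon
        exact hB (List.all_eq_true.2 hcon)
      have hk3 : levelMap.getD k 3 = 3 := by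
        have hx := (hc2 k).not.1 hkc
        rcases hval k with h | h | h <;> omega
      have h3' : ∀ k ∈ k0 :: t, levelMap.getD k 3 ≤ 3 := by
        intro k _; rcases hval k with h | h | h <;> omega
      have := hle 3 h3'
      have := hge k hk
      omega

-- ===== VERDICT (by name: the statement is the Claim_ definition above) =====
theorem interval_level_spec : Claim_equal_interval_level := by
  intro interval_hist _
  unfold Spec_interval_level interval_level interval_level_alt
  exact (core_eq (PySem.List.dedup (interval_hist.map Prod.fst))).symm ▸ rfl
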